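-- pv_equiv track=rewrite | github.com/quantivly/cz-linear | cz_linear/cz_linear.py | _determine_highest_increment
-- ===== SOURCE A (Python) =====
-- INCREMENT_PRIORITY = {
--     "MAJOR": 3,
--     "MINOR": 2,
--     "PATCH": 1,
--     "NONE": 0,
-- }
--
-- def _determine_highest_increment(increments: list[str]) -> str | None:
--     """Determine the highest increment from a list.
--
--     Parameters
--     ----------
--     increments : list[str]
--         List of increment types
--
--     Returns
--     -------
--     str | None
--         The highest increment type or None
--     """
--     if not increments:
--         return None
--
--     increments_with_priority = [
--         (INCREMENT_PRIORITY.get(inc, 0), inc) for inc in increments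
--     ]
--     highest = max(increments_with_priority, key=lambda x: x[0])
--
--     return highest[1] if highest[0] > 0 else None
-- ===== SOURCE B (Python) =====
-- def _determine_highest_increment(increments: list[str]) -> str | None:
--     """Return the highest-priority increment name present, else None."""
--     for name in ("MAJOR", "MINOR", "PATCH"):
--         if name in increments:
--             return name
--     return None
-- ===== Notes on version B (the rewrite author's own statement) =====
-- stated objective: idiomatic
-- what changed: Instead of building a (priority, name) pair for every element and taking max with a key, B loops over the three fixed priority names in descending order and returns the first one present in the input via a membership test.
import Mathlib
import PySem

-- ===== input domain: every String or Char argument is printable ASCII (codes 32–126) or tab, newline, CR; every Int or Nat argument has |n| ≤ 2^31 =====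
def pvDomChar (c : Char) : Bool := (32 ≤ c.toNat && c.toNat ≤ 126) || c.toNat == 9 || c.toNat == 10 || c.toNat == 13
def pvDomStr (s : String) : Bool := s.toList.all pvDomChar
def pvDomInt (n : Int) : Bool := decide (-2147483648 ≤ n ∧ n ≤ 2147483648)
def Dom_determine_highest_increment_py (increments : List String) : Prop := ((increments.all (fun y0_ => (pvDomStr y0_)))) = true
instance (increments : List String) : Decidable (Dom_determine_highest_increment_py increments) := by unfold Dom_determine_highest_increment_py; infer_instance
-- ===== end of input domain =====

-- B does the same job by probing the fixed priority names in descending order; idiomatic, not faster.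

-- ===== PORT A =====
def INCREMENT_PRIORITY : PySem.Dict String Int :=
  PySem.Dict.ofList [("MAJOR", 3), ("MINOR", 2), ("PATCH", 1), ("NONE", 0)]

def determine_highest_increment_py (increments : List String) : Option String :=
  if increments = [] then none
  else
    let increments_with_priority :=
      increments.map (fun inc => (INCREMENT_PRIORITY.getD inc 0, inc))
    match PySem.List.max? increments_with_priority (fun x => x.1) with
    | none => none
    | some highest => if highest.1 > 0 then some highest.2 else none

-- ===== PORT B =====
def determine_highest_increment_py_alt (increments : List String) : Option String :=
  (["MAJOR", "MINOR", "PATCH"]).find? (fun name => increments.contains name)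

-- ===== PRECONDITION & SPEC =====
def Spec_determine_highest_increment_py (increments : List String) (out : Option String) : Prop := out = determine_highest_increment_py_alt increments
instance (increments : List String) (out : Option String) : Decidable (Spec_determine_highest_increment_py increments out) := by unfold Spec_determine_highest_increment_py; infer_instance

-- ===== CLAIM (what is proved, stated in full; the proofs are below) =====
def Claim_equal_determine_highest_increment_py : Prop := ∀ (increments : List String), Dom_determine_highest_increment_py increments → Spec_determine_highest_increment_py increments (determine_highest_increment_py increments)

-- ===== LEMMAS AND PROOFS =====

-- the dict lookup as a chain of string comparisons
theorem prio_eq (s : String) :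
    INCREMENT_PRIORITY.getD s 0 =
      if s = "MAJOR" then 3 else if s = "MINOR" then 2
      else if s = "PATCH" then 1 else 0 := by
  by_cases h1 : s = "MAJOR"
  · subst h1; decide
  · by_cases h2 : s = "MINOR"
    · subst h2; decide
    · by_cases h3 : s = "PATCH"
      · subst h3; decide
      · by_cases h4 : s = "NONE"
        · subst h4; decide
        · simp only [h1, h2, h3, if_false]
          have hins : INCREMENT_PRIORITY =
              ((((PySem.Dict.empty.insert "MAJOR" (3 : Int)).insert "MINOR" 2).insert
                "PATCH" 1).insert "NONE" 0) := by decide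
          rw [hins, PySem.Dict.getD_insert_of_ne _ _ _ h4,
            PySem.Dict.getD_insert_of_ne _ _ _ h3,
            PySem.Dict.getD_insert_of_ne _ _ _ h2,
            PySem.Dict.getD_insert_of_ne _ _ _ h1,
            PySem.Dict.getD_empty]

theorem prio_le_three (s : String) : INCREMENT_PRIORITY.getD s 0 ≤ 3 := by
  rw [prio_eq]; split_ifs <;> omega

theorem determine_highest_increment_py_spec : Claim_equal_determine_highest_increment_py := by
  intro increments _
  unfold Spec_determine_highest_increment_py determine_highest_increment_py
    determine_highest_increment_py_alt
  by_cases hnil : increments = []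
  · subst hnil; simp
  · simp only [hnil, if_false]
    set pairs := increments.map (fun inc => (INCREMENT_PRIORITY.getD inc 0, inc)) with hpairs
    have hpne : pairs ≠ [] := by simpa [hpairs] using hnil
    obtain ⟨m, hm⟩ : ∃ m, PySem.List.max? pairs (fun x => x.1) = some m := by
      cases h : PySem.List.max? pairs (fun x => x.1) with
      | none => exact absurd ((PySem.List.max?_eq_none_iff pairs _).mp h) hpne
      | some m => exact ⟨m, rfl⟩
    have hmem := PySem.List.max?_mem hm
    have hmax := PySem.List.max?_isMax hm
    obtain ⟨inc, hinc, hincm⟩ := List.mem_map.mp hmem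
    rw [hm]
    by_cases hM : "MAJOR" ∈ increments
    · have h3 : (3 : Int) ≤ m.1 := by
        have := hmax (INCREMENT_PRIORITY.getD "MAJOR" 0, "MAJOR")
          (List.mem_map.mpr ⟨"MAJOR", hM, rfl⟩)
        simpa [prio_eq] using this
      have hm1 : m.1 = 3 := le_antisymm (by rw [← hincm]; exact prio_le_three inc) h3
      have hinc' : inc = "MAJOR" := by
        have : INCREMENT_PRIORITY.getD inc 0 = 3 := by rw [← hm1, ← hincm]
        rw [prio_eq] at this; split_ifs at this <;> first | assumption | omega
      have : m.2 = "MAJOR" := by rw [← hincm, hinc']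
      simp [hm1, this, List.find?, hM]
    · have hub : ∀ s ∈ increments, INCREMENT_PRIORITY.getD s 0 ≤ 2 := by
        intro s hs; rw [prio_eq]
        split_ifs with h1 <;> try omega
        exact absurd (h1 ▸ hs) hM
      by_cases hMi : "MINOR" ∈ increments
      · have h2 : (2 : Int) ≤ m.1 := by
          have := hmax (INCREMENT_PRIORITY.getD "MINOR" 0, "MINOR")
            (List.mem_map.mpr ⟨"MINOR", hMi, rfl⟩)
          simpa [prio_eq] using this
        have hm1 : m.1 = 2 := le_antisymm (by rw [← hincm]; exact hub inc hinc) h2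
        have hinc' : inc = "MINOR" := by
          have : INCREMENT_PRIORITY.getD inc 0 = 2 := by rw [← hm1, ← hincm]
          rw [prio_eq] at this; split_ifs at this <;> first | assumption | omega
        have : m.2 = "MINOR" := by rw [← hincm, hinc']
        simp [hm1, this, List.find?, hM, hMi]
      · have hub2 : ∀ s ∈ increments, INCREMENT_PRIORITY.getD s 0 ≤ 1 := by
          intro s hs; rw [prio_eq]
          split_ifs with h1 h2 <;> try omega
          · exact absurd (h1 ▸ hs) hM
          · exact absurd (h2 ▸ hs) hMi
        by_cases hP : "PATCH" ∈ increments
        · have h1 : (1 : Int) ≤ m.1 := by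
            have := hmax (INCREMENT_PRIORITY.getD "PATCH" 0, "PATCH")
              (List.mem_map.mpr ⟨"PATCH", hP, rfl⟩)
            simpa [prio_eq] using this
          have hm1 : m.1 = 1 := le_antisymm (by rw [← hincm]; exact hub2 inc hinc) h1
          have hinc' : inc = "PATCH" := by
            have : INCREMENT_PRIORITY.getD inc 0 = 1 := by rw [← hm1, ← hincm]
            rw [prio_eq] at this; split_ifs at this <;> first | assumption | omega
          have : m.2 = "PATCH" := by rw [← hincm, hinc']
          simp [hm1, this, List.find?, hM, hMi, hP]
        · have hub3 : ∀ s ∈ increments, INCREMENT_PRIORITY.getD s 0 ≤ 0 := by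
            intro s hs; rw [prio_eq]
            split_ifs with h1 h2 h3 <;> try omega
            · exact absurd (h1 ▸ hs) hM
            · exact absurd (h2 ▸ hs) hMi
            · exact absurd (h3 ▸ hs) hP
          have hm1 : ¬ (0 : Int) < m.1 := by
            rw [← hincm]; exact not_lt.mpr (hub3 inc hinc)
          simp [hm1, List.find?, hM, hMi, hP]
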